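-- pv_equiv track=rewrite | github.com/mahmudhera/phylogenetic-tree-using-fracminhash | construct_fmh_sketches.py | build_kmers
-- ===== SOURCE A (Python) =====
-- def build_kmers(sequence, ksize):
--     '''
--     Given a sequence and ksize, construct list of all kmers.
--     Capital letters are used
--     Skip all kmers with N or R.
--     Returns: list - all kmers
--     '''
--     sequence = sequence.upper()
--     kmers = []
--     n_kmers = len(sequence) - ksize + 1
--     for i in range(n_kmers):
--         kmer = sequence[i:i + ksize]
--         if 'N' in kmer or 'R' in kmer:
--             continue
--         kmers.append(kmer)
--     return kmers
-- ===== SOURCE B (Python) =====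
-- def _windows(seg, ksize):
--     # all full-length windows of a clean segment
--     return [seg[i:i + ksize] for i in range(len(seg) - ksize + 1)]
--
--
-- def build_kmers(sequence, ksize):
--     '''
--     One pass: cut the upper-cased sequence at every N/R into clean segments
--     and emit every length-ksize window of each segment, in order.
--     A negative ksize names no k-mer length, so no k-mers exist.
--     '''
--     if ksize < 0:
--         return []
--     kmers = []
--     seg = ''
--     for c in sequence.upper():
--         if c == 'N' or c == 'R':
--             kmers += _windows(seg, ksize)
--             seg = ''
--         else:
--             seg += c
--     kmers += _windows(seg, ksize)
--     return kmers
-- ===== Notes on version B (the rewrite author's own statement) =====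
-- stated objective: alternative
-- what changed: Instead of slicing every window and scanning each for N/R, B makes one pass that cuts the upper-cased sequence at every N/R into clean segments and emits all full-length windows of each segment; concatenation reproduces A's order.
-- intended difference: For ksize < 0 A's slices sequence[i:i+ksize] wrap around via Python's negative-slice rule, so A returns leftover slice fragments and empty strings (e.g. ['A','','',''] on ('AN',-1)); B returns [] since no k-mer has a negative length, which is the intended value. — e.g. on build_kmers("AN", -1): A returns ["A", "", "", ""], B returns []
import Mathlib
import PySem

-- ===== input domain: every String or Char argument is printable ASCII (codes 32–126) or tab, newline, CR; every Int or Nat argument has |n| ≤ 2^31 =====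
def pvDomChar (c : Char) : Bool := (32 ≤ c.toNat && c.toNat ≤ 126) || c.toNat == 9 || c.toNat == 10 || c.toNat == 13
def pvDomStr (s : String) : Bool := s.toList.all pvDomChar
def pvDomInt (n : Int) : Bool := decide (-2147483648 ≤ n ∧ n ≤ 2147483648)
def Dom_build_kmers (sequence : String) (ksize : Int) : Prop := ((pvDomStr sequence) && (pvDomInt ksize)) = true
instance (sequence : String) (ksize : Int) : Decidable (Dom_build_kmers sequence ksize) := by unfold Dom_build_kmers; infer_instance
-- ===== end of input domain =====

-- B cuts the upper-cased sequence at every N/R and windows each clean segment in one pass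
-- (no per-window N/R scan); for ksize < 0, B returns [] instead of A's wraparound-slice values.

-- ===== PORT A =====
-- A's loop, on the upper-cased character list
def pvKmersA (s : List Char) (ksize : Int) : List String :=
  let n_kmers : Int := (s.length : Int) - ksize + 1
  (PySem.List.pyRange 0 n_kmers).foldl
    (fun kmers i =>
      let kmer : List Char := PySem.List.slice s (some i) (some (i + ksize))
      if PySem.Chars.isIn ['N'] kmer || PySem.Chars.isIn ['R'] kmer then kmers
      else kmers ++ [String.mk kmer]) []

def build_kmers (sequence : String) (ksize : Int) : List String :=
  pvKmersA (PySem.Str.upper sequence).toList ksize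

-- ===== PORT B =====
-- _windows of Source B: all full-length windows of a clean segment
def pvWindowsB (seg : List Char) (ksize : Int) : List String :=
  (PySem.List.pyRange 0 ((seg.length : Int) - ksize + 1)).map
    (fun i => String.mk (PySem.List.slice seg (some i) (some (i + ksize))))

-- the one-pass loop of B: cut at N/R, flushing the windows of each finished segment
def pvLoopB (ksize : Int) : List Char → List String → List Char → List String
  | [], kmers, seg => kmers ++ pvWindowsB seg ksize
  | c :: cs, kmers, seg =>
      if c = 'N' ∨ c = 'R' then pvLoopB ksize cs (kmers ++ pvWindowsB seg ksize) []
      else pvLoopB ksize cs kmers (seg ++ [c])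

def build_kmers_alt (sequence : String) (ksize : Int) : List String :=
  if ksize < 0 then []
  else pvLoopB ksize (PySem.Str.upper sequence).toList [] []

-- ===== PRECONDITION & SPEC =====
-- For ksize < 0 A's windows sequence[i:i+ksize] hit Python's negative-slice wraparound and A
-- returns leftover slice fragments plus empty strings, while B returns []: no k-mer has a
-- negative length, so B's empty answer is the intended one.
def D_build_kmers (sequence : String) (ksize : Int) : Prop := ksize < 0
instance (sequence : String) (ksize : Int) : Decidable (D_build_kmers sequence ksize) := by unfold D_build_kmers; infer_instance

def Spec_build_kmers (sequence : String) (ksize : Int) (out : List String) : Prop :=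
  ¬ D_build_kmers sequence ksize → out = build_kmers_alt sequence ksize
instance (sequence : String) (ksize : Int) (out : List String) : Decidable (Spec_build_kmers sequence ksize out) := by unfold Spec_build_kmers; infer_instance

def pvDiffWitness_build_kmers : String × Int := ("AN", -1)
def pvDiffWitnessOut_build_kmers : (List String) × (List String) := (["A", "", "", ""], [])

-- ===== CLAIM (what is proved, stated in full; the proofs are below) =====
def Claim_unchanged_build_kmers : Prop := ∀ (sequence : String) (ksize : Int), Dom_build_kmers sequence ksize → Spec_build_kmers sequence ksize (build_kmers sequence ksize)
def Claim_changed_build_kmers : Prop := Dom_build_kmers (pvDiffWitness_build_kmers.1) (pvDiffWitness_build_kmers.2) ∧ D_build_kmers (pvDiffWitness_build_kmers.1) (pvDiffWitness_build_kmers.2) ∧ build_kmers (pvDiffWitness_build_kmers.1) (pvDiffWitness_build_kmers.2) = pvDiffWitnessOut_build_kmers.1 ∧ build_kmers_alt (pvDiffWitness_build_kmers.1) (pvDiffWitness_build_kmers.2) = pvDiffWitnessOut_build_kmers.2 ∧ pvDiffWitnessOut_build_kmers.1 ≠ pvDiffWitnessOut_build_kmers.2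
def Claim_exact_build_kmers : Prop := ∀ (sequence : String) (ksize : Int), Dom_build_kmers sequence ksize → D_build_kmers sequence ksize → build_kmers sequence ksize ≠ build_kmers_alt sequence ksize

-- ===== LEMMAS AND PROOFS =====

-- a character A's filter rejects
def pvBad (c : Char) : Bool := c == 'N' || c == 'R'

-- A's kept windows of m, as a filterMap over window start positions
def pvWinF (kn : Nat) (m : List Char) : List String :=
  (List.range (m.length + 1 - kn)).filterMap
    (fun i => if ((m.drop i).take kn).any pvBad then none else some (String.mk ((m.drop i).take kn)))

-- all windows of m (B's per-segment output)
def pvWinM (kn : Nat) (m : List Char) : List String :=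
  (List.range (m.length + 1 - kn)).map (fun i => String.mk ((m.drop i).take kn))

lemma pvWinF_cons (kn : Nat) (c : Char) (cs : List Char) :
    pvWinF kn (c :: cs) =
      (if kn ≤ cs.length + 1 then
        (if ((c :: cs).take kn).any pvBad then [] else [String.mk ((c :: cs).take kn)])
       else []) ++ pvWinF kn cs := by
  by_cases h : kn ≤ cs.length + 1
  · have hlen : (c :: cs).length + 1 - kn = (cs.length + 1 - kn) + 1 := by
      simp only [List.length_cons]; omega
    rw [pvWinF, hlen, List.range_succ_eq_map]
    by_cases hb : ((c :: cs).take kn).any pvBad = true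
    · rw [List.filterMap_cons_none (by simp [hb]), List.filterMap_map, if_pos h, if_pos hb,
          List.nil_append]
      rfl
    · rw [Bool.not_eq_true] at hb
      rw [List.filterMap_cons_some (b := String.mk ((c :: cs).take kn)) (by simp [hb]),
          List.filterMap_map, if_pos h, if_neg (by simp [hb]), List.singleton_append]
      rfl
  · have h1 : cs.length + 1 + 1 - kn = 0 := by omega
    have h2 : cs.length + 1 - kn = 0 := by omega
    simp [pvWinF, h1, h2, h]

lemma pvWinM_cons (kn : Nat) (c : Char) (cs : List Char) :
    pvWinM kn (c :: cs) =
      (if kn ≤ cs.length + 1 then [String.mk ((c :: cs).take kn)] else []) ++ pvWinM kn cs := by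
  by_cases h : kn ≤ cs.length + 1
  · have hlen : (c :: cs).length + 1 - kn = (cs.length + 1 - kn) + 1 := by
      simp only [List.length_cons]; omega
    rw [pvWinM, hlen, List.range_succ_eq_map, List.map_cons, List.map_map, if_pos h,
        List.singleton_append, List.drop_zero]
    rfl
  · have h1 : cs.length + 1 + 1 - kn = 0 := by omega
    have h2 : cs.length + 1 - kn = 0 := by omega
    simp [pvWinM, h1, h2, h]

lemma pvWinF_of_nobad (kn : Nat) (m : List Char) (hm : ∀ c ∈ m, pvBad c = false) :
    pvWinF kn m = pvWinM kn m := by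
  rw [pvWinF, pvWinM]
  have hcong : ∀ i ∈ List.range (m.length + 1 - kn),
      (if ((m.drop i).take kn).any pvBad then none else some (String.mk ((m.drop i).take kn)))
        = (some ∘ fun i => String.mk ((m.drop i).take kn)) i := by
    intro i _
    rw [Function.comp_apply, if_neg]
    simp only [Bool.not_eq_true, List.any_eq_false]
    intro x hx
    exact hm x (List.mem_of_mem_drop (List.mem_of_mem_take hx))
  rw [List.filterMap_congr hcong, List.filterMap_eq_map]

lemma pvWinF_split (kn : Nat) (c : Char) (r : List Char) (hc : pvBad c = true) :
    ∀ A : List Char, (∀ x ∈ A, pvBad x = false) →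
      pvWinF kn (A ++ c :: r) = pvWinM kn A ++ pvWinF kn r := by
  intro A
  induction A with
  | nil =>
    intro _
    rw [List.nil_append, pvWinF_cons]
    cases kn with
    | zero => simp [pvWinM]
    | succ n =>
      have hany : ((c :: r).take (n + 1)).any pvBad = true :=
        List.any_eq_true.mpr ⟨c, by simp [List.take_succ_cons], hc⟩
      have hM : pvWinM (n + 1) ([] : List Char) = [] := by simp [pvWinM]
      by_cases h : n + 1 ≤ r.length + 1
      · rw [if_pos h, if_pos hany, hM]
      · rw [if_neg h, hM]
  | cons a A' ih =>
    intro hA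
    have hA' : ∀ x ∈ A', pvBad x = false := fun x hx => hA x (List.mem_cons_of_mem a hx)
    have hcons : a :: A' ++ c :: r = a :: (A' ++ c :: r) := rfl
    rw [hcons, pvWinF_cons, pvWinM_cons, ih hA', List.append_assoc]
    congr 1
    by_cases h1 : kn ≤ A'.length + 1
    · have h2 : kn ≤ (A' ++ c :: r).length + 1 := by
        simp only [List.length_append, List.length_cons]; omega
      have htake : (a :: (A' ++ c :: r)).take kn = (a :: A').take kn := by
        rw [show a :: (A' ++ c :: r) = (a :: A') ++ (c :: r) from rfl,
            List.take_append_of_le_length (by simp only [List.length_cons]; omega)]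
      have hnb : ¬ ((a :: A').take kn).any pvBad = true := by
        simp only [Bool.not_eq_true, List.any_eq_false]
        intro x hx
        exact hA x (List.mem_of_mem_take hx)
      rw [if_pos h1, if_pos h2, htake, if_neg hnb]
    · rw [if_neg h1]
      by_cases h2 : kn ≤ (A' ++ c :: r).length + 1
      · have htake : (a :: (A' ++ c :: r)).take kn
            = (a :: A') ++ (c :: r).take (kn - (a :: A').length) := by
          rw [show a :: (A' ++ c :: r) = (a :: A') ++ (c :: r) from rfl, List.take_append]
          congr 1
          exact List.take_of_length_le (by simp only [List.length_cons]; omega)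
        have hmem : c ∈ (a :: (A' ++ c :: r)).take kn := by
          rw [htake]
          refine List.mem_append_right _ ?_
          cases hk : kn - (a :: A').length with
          | zero => simp only [List.length_cons] at hk; omega
          | succ m => simp [List.take_succ_cons]
        rw [if_pos h2, if_pos (List.any_eq_true.mpr ⟨c, hmem, hc⟩)]
      · rw [if_neg h2]

lemma pvLoopB_acc (k : Int) (l : List Char) :
    ∀ kmers seg, pvLoopB k l kmers seg = kmers ++ pvLoopB k l [] seg := by
  induction l with
  | nil => intro kmers seg; simp [pvLoopB]
  | cons c cs ih =>
    intro kmers seg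
    by_cases h : c = 'N' ∨ c = 'R'
    · rw [pvLoopB, pvLoopB, if_pos h, if_pos h, ih (kmers ++ pvWindowsB seg k),
          ih ([] ++ pvWindowsB seg k), List.nil_append, List.append_assoc]
    · rw [pvLoopB, pvLoopB, if_neg h, if_neg h, ih kmers, ih []]

lemma pvWindowsB_eq (k : Int) (hk : 0 ≤ k) (seg : List Char) :
    pvWindowsB seg k = pvWinM k.toNat seg := by
  rw [pvWindowsB, pvWinM]
  by_cases hn : 0 ≤ (seg.length : Int) - k + 1
  · have hcast : (seg.length : Int) - k + 1 = ((seg.length + 1 - k.toNat : Nat) : Int) := by omega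
    rw [hcast, PySem.List.pyRange_zero_natCast, List.map_map]
    apply List.map_congr_left
    intro i _
    have hik : (i : Int) + k = ((i + k.toNat : Nat) : Int) := by omega
    simp only [Function.comp_apply, hik, PySem.List.slice_natCast]
    congr 2
    omega
  · have h1 : PySem.List.pyRange 0 ((seg.length : Int) - k + 1) = [] := by
      simp [PySem.List.pyRange]; omega
    have h2 : seg.length + 1 - k.toNat = 0 := by omega
    simp [h1, h2]

-- A's per-window N-or-R test is exactly 'some rejected character occurs in the window'
lemma pvCond_eq (w : List Char) :
    (PySem.Chars.isIn ['N'] w || PySem.Chars.isIn ['R'] w) = w.any pvBad := by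
  rw [Bool.eq_iff_iff]
  simp only [Bool.or_eq_true, PySem.Chars.isIn_iff_infix, List.singleton_infix_iff,
    List.any_eq_true]
  constructor
  · rintro (h | h)
    · exact ⟨'N', h, by decide⟩
    · exact ⟨'R', h, by decide⟩
  · rintro ⟨x, hx, hbx⟩
    have hx' : x = 'N' ∨ x = 'R' := by simpa [pvBad] using hbx
    rcases hx' with rfl | rfl
    · exact Or.inl hx
    · exact Or.inr hx

lemma pvKmersA_eq (s : List Char) (k : Int) (hk : 0 ≤ k) :
    pvKmersA s k = pvWinF k.toNat s := by
  rw [pvKmersA]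
  have hstep : (fun (kmers : List String) (i : Int) =>
        if PySem.Chars.isIn ['N'] (PySem.List.slice s (some i) (some (i + k)))
            || PySem.Chars.isIn ['R'] (PySem.List.slice s (some i) (some (i + k))) then kmers
        else kmers ++ [String.mk (PySem.List.slice s (some i) (some (i + k)))])
      = (fun (kmers : List String) (i : Int) =>
        if !(PySem.Chars.isIn ['N'] (PySem.List.slice s (some i) (some (i + k)))
            || PySem.Chars.isIn ['R'] (PySem.List.slice s (some i) (some (i + k)))) then
          kmers ++ [String.mk (PySem.List.slice s (some i) (some (i + k)))]
        else kmers) := by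
    funext kmers i
    by_cases h : (PySem.Chars.isIn ['N'] (PySem.List.slice s (some i) (some (i + k)))
        || PySem.Chars.isIn ['R'] (PySem.List.slice s (some i) (some (i + k)))) = true
    · simp [h]
    · simp [h]
  simp only [hstep, PySem.List.foldl_append_if, List.nil_append]
  have hslice : ∀ i : Nat, PySem.List.slice s (some (i : Int)) (some ((i : Int) + k))
      = (s.drop i).take k.toNat := by
    intro i
    have hik : (i : Int) + k = ((i + k.toNat : Nat) : Int) := by omega
    rw [hik, PySem.List.slice_natCast]
    congr 1
    omega
  by_cases hn : 0 ≤ (s.length : Int) - k + 1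
  · have hcast : (s.length : Int) - k + 1 = ((s.length + 1 - k.toNat : Nat) : Int) := by omega
    rw [hcast, PySem.List.pyRange_zero_natCast, List.filter_map, List.map_map]
    have hfm : ∀ (L : List Nat),
        L.filterMap (fun i => if ((s.drop i).take k.toNat).any pvBad then none
            else some (String.mk ((s.drop i).take k.toNat)))
          = List.map (fun i => String.mk ((s.drop i).take k.toNat))
              (L.filter (fun i => !((s.drop i).take k.toNat).any pvBad)) := by
      intro L
      induction L with
      | nil => rfl
      | cons a L ihL =>
        by_cases h : ((s.drop a).take k.toNat).any pvBad = true
        · rw [List.filterMap_cons_none (by rw [if_pos h]), ihL,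
              List.filter_cons_of_neg (by simp [h])]
        · rw [Bool.not_eq_true] at h
          rw [List.filterMap_cons_some (b := String.mk ((s.drop a).take k.toNat)) (by simp [h]),
              ihL, List.filter_cons_of_pos (by simp [h]), List.map_cons]
    rw [pvWinF, hfm]
    simp only [Function.comp_def]
    congr 1
    · funext i
      rw [hslice i]
    · apply List.filter_congr
      intro i _
      rw [hslice i, pvCond_eq]
  · have h1 : PySem.List.pyRange 0 ((s.length : Int) - k + 1) = [] := by
      simp [PySem.List.pyRange]; omega
    have h2 : s.length + 1 - k.toNat = 0 := by omega
    simp [h1, pvWinF, h2]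

lemma pvLoopB_eq (k : Int) (hk : 0 ≤ k) :
    ∀ (l acc : List Char), (∀ x ∈ acc, pvBad x = false) →
      pvLoopB k l [] acc = pvWinF k.toNat (acc ++ l) := by
  intro l
  induction l with
  | nil =>
    intro acc hacc
    rw [pvLoopB, List.nil_append, List.append_nil, pvWindowsB_eq k hk, pvWinF_of_nobad _ _ hacc]
  | cons c cs ih =>
    intro acc hacc
    by_cases h : c = 'N' ∨ c = 'R'
    · have hbad : pvBad c = true := by
        rcases h with h | h <;> simp [pvBad, h]
      rw [pvLoopB, if_pos h, pvLoopB_acc, List.nil_append, pvWindowsB_eq k hk,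
          ih [] (by intro x hx; simp at hx), pvWinF_split k.toNat c cs hbad acc hacc,
          List.nil_append]
    · have hgood : pvBad c = false := by
        simp only [pvBad, Bool.or_eq_false_iff, beq_eq_false_iff_ne]
        exact ⟨fun hc => h (Or.inl hc), fun hc => h (Or.inr hc)⟩
      have hacc' : ∀ x ∈ acc ++ [c], pvBad x = false := by
        intro x hx
        rcases List.mem_append.mp hx with hx | hx
        · exact hacc x hx
        · simp only [List.mem_singleton] at hx; subst hx; exact hgood
      rw [pvLoopB, if_neg h, ih (acc ++ [c]) hacc']
      congr 1
      simp

-- ===== VERDICT (by name: the statement is the Claim_ definition above) =====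
theorem build_kmers_spec : Claim_unchanged_build_kmers := by
  intro sequence ksize _
  unfold Spec_build_kmers
  intro hnD
  have hk : 0 ≤ ksize := by unfold D_build_kmers at hnD; omega
  rw [build_kmers, build_kmers_alt, if_neg (by omega), pvKmersA_eq _ _ hk,
      pvLoopB_eq ksize hk _ [] (by intro x hx; simp at hx), List.nil_append]

theorem build_kmers_changed : Claim_changed_build_kmers := by
  unfold Claim_changed_build_kmers; decide

theorem build_kmers_tight : Claim_exact_build_kmers := by
  intro sequence ksize _ hD
  unfold D_build_kmers at hD
  rw [build_kmers_alt, if_pos hD, build_kmers, pvKmersA]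
  intro hEq
  revert hEq
  set s := (PySem.Str.upper sequence).toList with hs
  set n : Int := (s.length : Int) - ksize + 1 with hn
  rw [PySem.List.pyRange_one_append 0 (n - 1) n (by omega) (by omega),
      PySem.List.pyRange_one_cons (show n - 1 < n by omega),
      show n - 1 + 1 = n from by omega,
      show PySem.List.pyRange n n = [] from by simp [PySem.List.pyRange],
      List.foldl_append]
  have hsl : PySem.List.slice s (some (n - 1)) (some (n - 1 + ksize)) = [] := by
    simp only [hn, PySem.List.slice, PySem.List.clampIdx]
    rw [if_neg (by omega), if_neg (by omega)]
    rw [List.drop_eq_nil_of_le (by omega)]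
    simp
  simp only [List.foldl_cons, List.foldl_nil, hsl]
  rw [if_neg (by decide)]
  simp
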